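-- pv_equiv track=rewrite | github.com/krishnaratnala/Git_DSA_practice | __init__.py | findSubarraySum
-- ===== SOURCE A (Python) =====
-- def findSubarraySum(arr, n):
--     # calculate cumulative sum of array
--     # cArray[0] will store sum of zero elements
--     cArray = [0 for i in range(n + 1)]
--     for i in range(0, n, 1):
--         cArray[i + 1] = cArray[i] + arr[i]
--
--     subArrSum = []
--
--     # store all subarray sum in vector
--     for i in range(1, n + 1, 1):
--         for j in range(i, n + 1, 1):
--             subArrSum.append(cArray[j] -
--                              cArray[i - 1])
--
--     # sort the vector
--     subArrSum.sort(reverse=False)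
--
--     # mark all duplicate sub-array
--     # sum to zero
--     totalSum = 0
--     for i in range(0, len(subArrSum) - 1, 1):
--         if (subArrSum[i] == subArrSum[i + 1]):
--             j = i + 1
--             while (subArrSum[j] == subArrSum[i] and
--                    j < len(subArrSum)):
--                 subArrSum[j] = 0
--                 j += 1
--             subArrSum[i] = 0
--
--     # calculate total sum
--     for i in range(0, len(subArrSum), 1):
--         totalSum += subArrSum[i]
--
--     # return totalSum
--     return totalSum
-- ===== SOURCE B (Python) =====
-- def findSubarraySum(arr, n):
--     # one pass over all (i, j) windows keeping a running sum; count each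
--     # subarray-sum value in a hash map, then add up the values seen exactly once
--     freq = {}
--     for i in range(n):
--         s = 0
--         for j in range(i, n):
--             s += arr[j]
--             freq[s] = freq.get(s, 0) + 1
--     return sum(v for v, c in freq.items() if c == 1)
-- ===== Notes on version B (the rewrite author's own statement) =====
-- stated objective: faster
-- what changed: B replaces A's prefix-sum array + sort of all n^2 subarray sums + duplicate-zeroing scan by a single nested pass that counts subarray-sum frequencies in a hash map and sums the values with count 1 (no sort, no mutation pass).
-- outside the precondition, e.g. on findSubarraySum([0, 0], 2): A raises IndexError, B returns 0; on findSubarraySum([5, -5, 5], 3): A raises IndexError, B returns -5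
-- crash fix: A raises IndexError when its duplicate-zeroing scan runs off the end of the sorted sum list - exactly when the largest subarray sum occurs more than once, or the largest is 0 and the second-largest occurs more than once; B returns the sum of the subarray sums occurring exactly once there. — e.g. on findSubarraySum([5, -5, 5], 3): A raises IndexError, B returns -5
import Mathlib
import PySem

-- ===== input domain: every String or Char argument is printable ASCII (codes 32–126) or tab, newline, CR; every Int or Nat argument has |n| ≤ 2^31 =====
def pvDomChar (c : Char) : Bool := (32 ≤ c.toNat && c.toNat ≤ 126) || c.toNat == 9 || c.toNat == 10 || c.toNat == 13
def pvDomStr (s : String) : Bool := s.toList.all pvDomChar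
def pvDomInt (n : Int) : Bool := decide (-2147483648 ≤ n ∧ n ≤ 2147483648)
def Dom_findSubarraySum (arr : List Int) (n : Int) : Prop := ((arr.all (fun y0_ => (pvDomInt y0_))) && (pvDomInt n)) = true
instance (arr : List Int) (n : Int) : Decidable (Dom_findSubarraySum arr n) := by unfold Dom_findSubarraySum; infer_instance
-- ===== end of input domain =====

-- B replaces A's prefix-sum + sort + duplicate-zeroing pass by one hash-map counting
-- pass over all subarray sums (sum of the values with count 1); objective: faster.


-- ===== PORT A =====
-- the inner `while` of A: zero forward from index j while the value equals s[i]
-- (Python evaluates `s[j] == s[i]` before `j < len(s)`; where that read raises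
-- IndexError the input is outside Pre_; the fuel s.length bounds the loop)
def pvZeroFrom : Nat → List Int → Nat → Nat → List Int
  | 0, s, _, _ => s
  | fuel+1, s, i, j =>
      if s.getD j 0 = s.getD i 0 ∧ (j : Int) < s.length then
        pvZeroFrom fuel (s.set j 0) i (j+1)
      else s

-- body of A's duplicate-marking loop at outer index i
def pvPassStep (cur : List Int) (i : Nat) : List Int :=
  if cur.getD i 0 = cur.getD (i+1) 0 then
    (pvZeroFrom cur.length cur i (i+1)).set i 0
  else cur

-- cArray: cumulative sums, cArray[i+1] = cArray[i] + arr[i]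
def pvCArray (arr : List Int) (n : Int) : List Int :=
  (PySem.List.pyRange 0 n 1).foldl
    (fun cA i => cA.set (i+1).toNat (PySem.List.pyGetD cA i 0 + PySem.List.pyGetD arr i 0))
    (List.replicate (n+1).toNat 0)

-- subArrSum: all subarray sums cArray[j] - cArray[i-1]
def pvSubArr (arr : List Int) (n : Int) : List Int :=
  (PySem.List.pyRange 1 (n+1) 1).foldl
    (fun acc i => (PySem.List.pyRange i (n+1) 1).foldl
      (fun acc2 j => acc2 ++ [PySem.List.pyGetD (pvCArray arr n) j 0
        - PySem.List.pyGetD (pvCArray arr n) (i-1) 0]) acc)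
    []

-- subArrSum.sort()
def pvT (arr : List Int) (n : Int) : List Int :=
  PySem.List.sorted (pvSubArr arr n) (fun x => x) false

-- the state of subArrSum after the duplicate-marking loop
def pvT2 (arr : List Int) (n : Int) : List Int :=
  (PySem.List.pyRange 0 (((pvT arr n).length : Int) - 1) 1).foldl
    (fun cur i => pvPassStep cur i.toNat) (pvT arr n)

def findSubarraySum (arr : List Int) (n : Int) : Int :=
  (PySem.List.pyRange 0 ((pvT2 arr n).length : Int) 1).foldl
    (fun acc i => acc + PySem.List.pyGetD (pvT2 arr n) i 0) 0

-- ===== PORT B =====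
def findSubarraySum_alt (arr : List Int) (n : Int) : Int :=
  let freq := (PySem.List.pyRange 0 n 1).foldl
    (fun d i =>
      ((PySem.List.pyRange i n 1).foldl
        (fun (p : Int × PySem.Dict Int Int) j =>
          let s := p.1 + PySem.List.pyGetD arr j 0
          (s, p.2.insert s (p.2.getD s 0 + 1)))
        ((0 : Int), d)).2)
    PySem.Dict.empty
  freq.items.foldl (fun acc p => if p.2 = 1 then acc + p.1 else acc) 0

-- ===== PRECONDITION & SPEC =====
-- sum of the first k elements of arr (the value of Python's cArray[k])
def pvP (arr : List Int) (k : Nat) : Int := (arr.take k).sum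

-- the multiset of all subarray sums of arr[0:n], as both programs enumerate them
def pvSums (arr : List Int) (n : Int) : List Int :=
  (PySem.List.pyRange 0 n 1).flatMap
    (fun i => (PySem.List.pyRange i n 1).map
      (fun j => pvP arr (j.toNat + 1) - pvP arr i.toNat))

def pvSorted (l : List Int) : List Int := PySem.List.sorted l (fun x => x) false

-- A's marking loop runs off the end of the sorted sum list (IndexError) exactly when the
-- largest subarray sum is duplicated, or it is 0 and the second largest is duplicated
abbrev pvRaises (l : List Int) : Prop :=
  (2 ≤ l.length ∧ l.getD (l.length - 2) 0 = l.getD (l.length - 1) 0) ∨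
  (3 ≤ l.length ∧ l.getD (l.length - 1) 0 = 0 ∧ l.getD (l.length - 3) 0 = l.getD (l.length - 2) 0)

-- Pre_ excludes exactly the inputs on which A raises IndexError: n beyond the list length,
-- and the duplicate patterns of pvRaises; A returns normally everywhere else.
def Pre_findSubarraySum (arr : List Int) (n : Int) : Prop :=
  n ≤ (arr.length : Int) ∧ ¬ pvRaises (pvSorted (pvSums arr n))

instance (arr : List Int) (n : Int) : Decidable (Pre_findSubarraySum arr n) := by
  unfold Pre_findSubarraySum; infer_instance

def pvWitness_findSubarraySum : List Int × Int := ([1, 2], 2)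

-- A raises IndexError when the largest subarray sum occurs more than once, or is 0 while
-- the second largest occurs more than once; B returns the sum of the once-occurring sums there.
def Raises_findSubarraySum (arr : List Int) (n : Int) : Prop :=
  n ≤ (arr.length : Int) ∧ pvRaises (pvSorted (pvSums arr n))

instance (arr : List Int) (n : Int) : Decidable (Raises_findSubarraySum arr n) := by
  unfold Raises_findSubarraySum; infer_instance

def pvRaiseWitness_findSubarraySum : List Int × Int := ([5, -5, 5], 3)
def pvRaiseWitnessOut_findSubarraySum : Int := -5

def Spec_findSubarraySum (arr : List Int) (n : Int) (out : Int) : Prop := out = findSubarraySum_alt arr n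
instance (arr : List Int) (n : Int) (out : Int) : Decidable (Spec_findSubarraySum arr n out) := by unfold Spec_findSubarraySum; infer_instance

-- ===== CLAIM (what is proved, stated in full; the proofs are below) =====
def Claim_equal_findSubarraySum : Prop := ∀ (arr : List Int) (n : Int), Dom_findSubarraySum arr n → Pre_findSubarraySum arr n → Spec_findSubarraySum arr n (findSubarraySum arr n)

def Claim_raises_findSubarraySum : Prop :=
  (∀ (arr : List Int) (n : Int), Dom_findSubarraySum arr n → Raises_findSubarraySum arr n → ¬ Pre_findSubarraySum arr n) ∧
  (Dom_findSubarraySum (pvRaiseWitness_findSubarraySum.1) (pvRaiseWitness_findSubarraySum.2) ∧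
   Raises_findSubarraySum (pvRaiseWitness_findSubarraySum.1) (pvRaiseWitness_findSubarraySum.2) ∧
   findSubarraySum_alt (pvRaiseWitness_findSubarraySum.1) (pvRaiseWitness_findSubarraySum.2) = pvRaiseWitnessOut_findSubarraySum)

-- ===== LEMMAS AND PROOFS =====

-- duplicate position: index k of the sorted list has an equal neighbour
abbrev pvDup (t : List Int) (k : Nat) : Prop :=
  (0 < k ∧ t.getD (k-1) 0 = t.getD k 0) ∨ (k+1 < t.length ∧ t.getD k 0 = t.getD (k+1) 0)

-- invariant: which positions have been zeroed before outer iteration i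
abbrev pvZ (t : List Int) (i k : Nat) : Prop :=
  pvDup t k ∧ (k < i ∨ (0 < i ∧ t.getD (i-1) 0 = t.getD k 0))

def pvMapZ (t : List Int) (i : Nat) : List Int :=
  (List.range t.length).map (fun k => if pvZ t i k then 0 else t.getD k 0)

theorem pv_ext_getD {a b : List Int} (hl : a.length = b.length)
    (h : ∀ k, k < a.length → a.getD k 0 = b.getD k 0) : a = b := by
  apply List.ext_getElem hl
  intro i h1 h2
  have := h i h1
  simpa [List.getD, List.getElem?_eq_getElem, h1, h2] using this

theorem pv_sorted_mono (t : List Int) (hs : t.Pairwise (· ≤ ·)) {p q : Nat}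
    (hpq : p ≤ q) (hq : q < t.length) : t.getD p 0 ≤ t.getD q 0 := by
  have hp : p < t.length := lt_of_le_of_lt hpq hq
  rcases eq_or_lt_of_le hpq with rfl | hlt
  · rfl
  · have := (List.pairwise_iff_getElem.mp hs) p q hp hq hlt
    simpa [List.getD, List.getElem?_eq_getElem, hp, hq] using this

theorem pvMapZ_length (t : List Int) (i : Nat) : (pvMapZ t i).length = t.length := by
  simp [pvMapZ]

theorem pvMapZ_getD (t : List Int) (i k : Nat) (hk : k < t.length) :
    (pvMapZ t i).getD k 0 = if pvZ t i k then 0 else t.getD k 0 := by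
  simp [pvMapZ, List.getD, List.getElem?_range, hk]

theorem pvMapZ_zero (t : List Int) : pvMapZ t 0 = t := by
  apply pv_ext_getD (by simp [pvMapZ])
  intro k hk
  have hk' : k < t.length := by simpa [pvMapZ] using hk
  rw [pvMapZ_getD t 0 k hk']
  have h0 : ¬ pvZ t 0 k := by unfold pvZ; rintro ⟨-, h | ⟨h, -⟩⟩ <;> omega
  simp [h0]

theorem pvZ_mono (t : List Int) (hs : t.Pairwise (· ≤ ·)) (i k : Nat) (hk : k < t.length)
    (h : pvZ t i k) : pvZ t (i+1) k := by
  obtain ⟨hd, hc⟩ := h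
  refine ⟨hd, ?_⟩
  rcases hc with hlt | ⟨hi0, heq⟩
  · left; omega
  · by_cases hki : k < i + 1
    · left; exact hki
    · right
      refine ⟨by omega, ?_⟩
      have h1 : t.getD (i-1) 0 ≤ t.getD i 0 := pv_sorted_mono t hs (by omega) (by omega)
      have h2 : t.getD i 0 ≤ t.getD k 0 := pv_sorted_mono t hs (by omega) hk
      have : (i + 1) - 1 = i := by omega
      rw [this]; omega

theorem pv_getD_set_self (l : List Int) (i : Nat) (hi : i < l.length) (a : Int) :
    (l.set i a).getD i 0 = a := by
  simp [List.getD, List.getElem?_set, hi]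

theorem pv_getD_set_ne (l : List Int) (i k : Nat) (hne : i ≠ k) (a : Int) :
    (l.set i a).getD k 0 = l.getD k 0 := by
  simp [List.getD, List.getElem?_set, hne]

theorem pvZeroFrom_eq (i m : Nat) : ∀ (fuel : Nat) (s : List Int) (j : Nat),
    i < j → j ≤ m → m < s.length →
    (∀ k, j ≤ k → k < m → s.getD k 0 = s.getD i 0) →
    s.getD m 0 ≠ s.getD i 0 → m - j < fuel →
    pvZeroFrom fuel s i j =
      (List.range s.length).map (fun k => if j ≤ k ∧ k < m then 0 else s.getD k 0) := by
  intro fuel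
  induction fuel with
  | zero => intro s j _ _ _ _ _ h; omega
  | succ fuel ih =>
    intro s j hij hjm hm hrun hstop hfuel
    rcases eq_or_lt_of_le hjm with rfl | hjlt
    · -- j = m : loop does not fire
      rw [pvZeroFrom]
      have : ¬ (s.getD j 0 = s.getD i 0 ∧ (j : Int) < s.length) := by
        rintro ⟨h1, -⟩; exact hstop h1
      rw [if_neg this]
      apply pv_ext_getD (by simp)
      intro k hk
      rw [PySem.List.getD_map_range _ _ _ _ hk]
      have : ¬ (j ≤ k ∧ k < j) := by omega
      simp [this]
    · -- j < m : zero s[j], continue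
      rw [pvZeroFrom]
      have hjl : j < s.length := by omega
      have hcond : s.getD j 0 = s.getD i 0 ∧ (j : Int) < s.length := by
        refine ⟨hrun j le_rfl hjlt, by exact_mod_cast hjl⟩
      rw [if_pos hcond]
      have hset_i : (s.set j 0).getD i 0 = s.getD i 0 := pv_getD_set_ne s j i (by omega) 0
      have ih' := ih (s.set j 0) (j+1) (by omega) (by omega) (by simpa using hm)
        (by intro k h1 h2
            rw [pv_getD_set_ne s j k (by omega) 0, hset_i]
            exact hrun k (by omega) h2)
        (by rw [pv_getD_set_ne s j m (by omega) 0, hset_i]; exact hstop)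
        (by omega)
      rw [ih']
      apply pv_ext_getD (by simp)
      intro k hk
      have hk' : k < s.length := by simpa using hk
      rw [PySem.List.getD_map_range _ _ _ _ (by simpa using hk'),
          PySem.List.getD_map_range _ _ _ _ hk']
      by_cases hkj : k = j
      · subst hkj
        rw [if_neg (by omega : ¬ (k + 1 ≤ k ∧ k < m)),
            if_pos (show k ≤ k ∧ k < m from ⟨le_rfl, hjlt⟩)]
        exact pv_getD_set_self s k hjl 0
      · rw [pv_getD_set_ne s j k (fun h => hkj h.symm) 0]
        by_cases h1 : j + 1 ≤ k ∧ k < m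
        · rw [if_pos h1, if_pos (by omega : j ≤ k ∧ k < m)]
        · rw [if_neg h1, if_neg (by omega : ¬ (j ≤ k ∧ k < m))]

theorem pv_step_eq (t : List Int) (hs : t.Pairwise (· ≤ ·)) (hnr : ¬ pvRaises t)
    (i : Nat) (hi : i + 1 < t.length) :
    pvPassStep (pvMapZ t i) i = pvMapZ t (i+1) := by
  have hi' : i < t.length := by omega
  have hgi := pvMapZ_getD t i i hi'
  have hgi1 := pvMapZ_getD t i (i+1) hi
  rw [pvPassStep]
  by_cases hc : (pvMapZ t i).getD i 0 = (pvMapZ t i).getD (i+1) 0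
  · rw [if_pos hc]
    -- existence of a stopping index for the while loop
    have hex : ∃ k, i+1 ≤ k ∧ k < t.length ∧
        (pvMapZ t i).getD k 0 ≠ (pvMapZ t i).getD i 0 := by
      by_contra hall
      push_neg at hall
      have hlast := hall (t.length - 1) (by omega) (by omega)
      have h2nd : (pvMapZ t i).getD (t.length - 2) 0 = (pvMapZ t i).getD i 0 := by
        rcases Nat.lt_or_ge i (t.length - 2) with h | h
        · exact hall (t.length - 2) (by omega) (by omega)
        · have : i = t.length - 2 := by omega
          rw [this]
      rw [pvMapZ_getD t i (t.length - 1) (by omega)] at hlast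
      by_cases hZlast : pvZ t i (t.length - 1)
      · rcases hZlast.1 with ⟨h0, heq⟩ | ⟨h0, _⟩
        · exact hnr (Or.inl ⟨by omega, by
            have : t.length - 1 - 1 = t.length - 2 := by omega
            rw [← this]; exact heq⟩)
        · omega
      · rw [if_neg hZlast] at hlast
        rw [pvMapZ_getD t i (t.length - 2) (by omega)] at h2nd
        by_cases hZ2 : pvZ t i (t.length - 2)
        · rw [if_pos hZ2] at h2nd
          have hv0 : t.getD (t.length - 1) 0 = 0 := by rw [hlast, ← h2nd]
          rcases hZ2.1 with ⟨h0, heq⟩ | ⟨h0, heq⟩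
          · refine hnr (Or.inr ⟨by omega, hv0, ?_⟩)
            have e3 : t.length - 2 - 1 = t.length - 3 := by omega
            rw [← e3]; exact heq
          · refine hnr (Or.inl ⟨by omega, ?_⟩)
            have e2 : t.length - 2 + 1 = t.length - 1 := by omega
            rw [← e2]; exact heq
        · rw [if_neg hZ2] at h2nd
          refine hnr (Or.inl ⟨by omega, ?_⟩)
          rw [h2nd, hlast]
    classical
    set m := Nat.find hex with hmdef
    obtain ⟨hm1, hm2, hm3⟩ := Nat.find_spec hex
    have hrun : ∀ k, i+1 ≤ k → k < m →
        (pvMapZ t i).getD k 0 = (pvMapZ t i).getD i 0 := by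
      intro k hk1 hk2
      have := Nat.find_min hex hk2
      push_neg at this
      exact this hk1 (by omega)
    have hzf := pvZeroFrom_eq i m (pvMapZ t i).length (pvMapZ t i) (i+1)
      (by omega) hm1 (by rw [pvMapZ_length]; exact hm2) hrun hm3
      (by rw [pvMapZ_length]; omega)
    rw [hzf]
    apply pv_ext_getD
    · simp [pvMapZ]
    · intro k hk
      have hk' : k < t.length := by simpa [pvMapZ] using hk
      rw [pvMapZ_getD t (i+1) k hk']
      by_cases hki : k = i
      · subst hki
        rw [pv_getD_set_self _ k (by simpa [pvMapZ] using hk') 0]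
        have hdup : pvDup t k := by
          by_cases hZi : pvZ t k k
          · exact hZi.1
          · rw [hgi, if_neg hZi] at hc
            by_cases hZi1 : pvZ t k (k+1)
            · rcases hZi1.2 with h | ⟨h0, heq⟩
              · omega
              · have e1 : t.getD (k-1) 0 ≤ t.getD k 0 :=
                  pv_sorted_mono t hs (by omega) hk'
                have e2 : t.getD k 0 ≤ t.getD (k+1) 0 :=
                  pv_sorted_mono t hs (by omega) hi
                right; exact ⟨hi, by omega⟩
            · rw [hgi1, if_neg hZi1] at hc
              right; exact ⟨hi, hc⟩
        rw [if_pos ⟨hdup, Or.inl (by omega)⟩]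
      · rw [pv_getD_set_ne _ i k (fun h => hki h.symm) 0,
            PySem.List.getD_map_range _ _ _ _ (by simpa [pvMapZ] using hk')]
        by_cases hseg : i + 1 ≤ k ∧ k < m
        · rw [if_pos hseg]
          have hcurk := hrun k hseg.1 hseg.2
          by_cases hz : pvZ t i k
          · rw [if_pos (pvZ_mono t hs i k hk' hz)]
          · rw [pvMapZ_getD t i k hk', if_neg hz] at hcurk
            by_cases hZi : pvZ t i i
            · rw [hgi, if_pos hZi] at hcurk
              by_cases hzz : pvZ t (i+1) k
              · rw [if_pos hzz]
              · rw [if_neg hzz]; exact hcurk.symm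
            · rw [hgi, if_neg hZi] at hcurk
              have hdup : pvDup t k := by
                left
                refine ⟨by omega, ?_⟩
                have e1 : t.getD i 0 ≤ t.getD (k-1) 0 :=
                  pv_sorted_mono t hs (by omega) (by omega)
                have e2 : t.getD (k-1) 0 ≤ t.getD k 0 :=
                  pv_sorted_mono t hs (by omega) hk'
                omega
              rw [if_pos ⟨hdup, Or.inr ⟨by omega, by simpa using hcurk.symm⟩⟩]
        · rw [if_neg hseg, pvMapZ_getD t i k hk']
          by_cases hz : pvZ t i k
          · rw [if_pos hz, if_pos (pvZ_mono t hs i k hk' hz)]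
          · rw [if_neg hz]
            by_cases hz1 : pvZ t (i+1) k
            · exfalso
              have hQ : t.getD i 0 = t.getD k 0 := by
                rcases hz1.2 with h | ⟨h0, heq⟩
                · -- k < i + 1, k ≠ i so k < i, then pvZ t i k would hold
                  exact absurd ⟨hz1.1, Or.inl (by omega : k < i)⟩ hz
                · simpa using heq
              have hkm : m ≤ k := by
                rcases Nat.lt_or_ge k (i+1) with h | h
                · exact absurd ⟨hz1.1, Or.inl (by omega)⟩ hz
                · omega
              have htm : t.getD m 0 = t.getD i 0 := by
                have e1 : t.getD i 0 ≤ t.getD m 0 := pv_sorted_mono t hs (by omega) hm2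
                have e2 : t.getD m 0 ≤ t.getD k 0 := pv_sorted_mono t hs hkm hk'
                omega
              by_cases hZm : pvZ t i m
              · rcases hZm.2 with h | ⟨h0, heq⟩
                · omega
                · exact hz ⟨hz1.1, Or.inr ⟨h0, by rw [heq, htm, hQ]⟩⟩
              · have hcm : (pvMapZ t i).getD m 0 = t.getD m 0 := by
                  rw [pvMapZ_getD t i m hm2, if_neg hZm]
                by_cases hZi : pvZ t i i
                · rcases hZi.2 with h | ⟨h0, heq⟩
                  · omega
                  · exact hz ⟨hz1.1, Or.inr ⟨h0, by rw [heq, hQ]⟩⟩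
                · exact hm3 (by rw [hcm, htm, hgi, if_neg hZi])
            · rw [if_neg hz1]
  · rw [if_neg hc]
    apply pv_ext_getD (by simp [pvMapZ])
    intro k hk
    have hk' : k < t.length := by simpa [pvMapZ] using hk
    rw [pvMapZ_getD t i k hk', pvMapZ_getD t (i+1) k hk']
    by_cases hz : pvZ t i k
    · rw [if_pos hz, if_pos (pvZ_mono t hs i k hk' hz)]
    · rw [if_neg hz]
      by_cases hz1 : pvZ t (i+1) k
      · exfalso
        apply hc
        rw [hgi, hgi1]
        have hQ : i = k ∨ (i < k ∧ t.getD i 0 = t.getD k 0) := by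
          rcases hz1.2 with h | ⟨h0, heq⟩
          · rcases Nat.lt_or_ge k i with h' | h'
            · exact absurd ⟨hz1.1, Or.inl h'⟩ hz
            · left; omega
          · rcases Nat.lt_or_ge k i with h' | h'
            · exact absurd ⟨hz1.1, Or.inl h'⟩ hz
            · rcases Nat.eq_or_lt_of_le h' with h'' | h''
              · left; omega
              · right; exact ⟨h'', by simpa using heq⟩
        rcases hQ with rfl | ⟨hik, hQ⟩
        · -- k = i : t[i] = t[i+1] from pvDup and ¬(t[i-1] = t[i])
          have hni : ¬ (0 < i ∧ t.getD (i-1) 0 = t.getD i 0) := by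
            intro h; exact hz ⟨hz1.1, Or.inr h⟩
          have heq1 : t.getD i 0 = t.getD (i+1) 0 := by
            rcases hz1.1 with ⟨h0, heq⟩ | ⟨h0, heq⟩
            · exact absurd ⟨h0, heq⟩ hni
            · exact heq
          have hZii : ¬ pvZ t i i := hz
          rw [if_neg hZii]
          by_cases hZi1 : pvZ t i (i+1)
          · exfalso
            rcases hZi1.2 with h | ⟨h0, heq⟩
            · omega
            · have e1 : t.getD (i-1) 0 ≤ t.getD i 0 := pv_sorted_mono t hs (by omega) hi'
              have e2 : t.getD i 0 ≤ t.getD (i+1) 0 := pv_sorted_mono t hs (by omega) hi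
              exact hni ⟨h0, by omega⟩
          · rw [if_neg hZi1, heq1]
        · -- i < k with t[i] = t[k]
          have hni : ¬ (0 < i ∧ t.getD (i-1) 0 = t.getD k 0) := by
            intro h; exact hz ⟨hz1.1, Or.inr h⟩
          have heq1 : t.getD i 0 = t.getD (i+1) 0 := by
            have e1 : t.getD i 0 ≤ t.getD (i+1) 0 := pv_sorted_mono t hs (by omega) hi
            have e2 : t.getD (i+1) 0 ≤ t.getD k 0 := pv_sorted_mono t hs (by omega) hk'
            omega
          have hZii : ¬ pvZ t i i := by
            intro h
            rcases h.2 with h' | ⟨h0, heq⟩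
            · omega
            · exact hni ⟨h0, by rw [heq, hQ]⟩
          rw [if_neg hZii]
          by_cases hZi1 : pvZ t i (i+1)
          · exfalso
            rcases hZi1.2 with h | ⟨h0, heq⟩
            · omega
            · have e1 : t.getD (i-1) 0 ≤ t.getD i 0 := pv_sorted_mono t hs (by omega) hi'
              have e2 : t.getD i 0 ≤ t.getD (i+1) 0 := pv_sorted_mono t hs (by omega) hi
              exact hni ⟨h0, by omega⟩
          · rw [if_neg hZi1, heq1]
      · rw [if_neg hz1]

theorem pv_pass_aux (t : List Int) (hs : t.Pairwise (· ≤ ·)) (hnr : ¬ pvRaises t) :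
    ∀ (c i : Nat), (i : Int) + c = (t.length : Int) - 1 →
    (PySem.List.pyRange (i : Int) ((t.length : Int) - 1) 1).foldl
      (fun cur x => pvPassStep cur x.toNat) (pvMapZ t i) = pvMapZ t (i + c) := by
  intro c
  induction c with
  | zero =>
    intro i h
    rw [PySem.List.pyRange_one_eq_nil (by omega)]
    simp
  | succ c ih =>
    intro i h
    have hic : (i : Int) < (t.length : Int) - 1 := by omega
    rw [PySem.List.pyRange_one_cons hic]
    rw [List.foldl_cons]
    have hstep : pvPassStep (pvMapZ t i) (Int.toNat i) = pvMapZ t (i+1) := by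
      have : (Int.toNat (i : Int)) = i := by omega
      rw [this]
      exact pv_step_eq t hs hnr i (by omega)
    rw [hstep]
    have := ih (i+1) (by push_cast; omega)
    push_cast at this ⊢
    rw [this]
    congr 1
    omega

theorem pv_pass_eq (t : List Int) (hs : t.Pairwise (· ≤ ·)) (hnr : ¬ pvRaises t) :
    (PySem.List.pyRange 0 ((t.length : Int) - 1) 1).foldl (fun cur i => pvPassStep cur i.toNat) t
    = (List.range t.length).map (fun k => if pvDup t k then 0 else t.getD k 0) := by
  rcases Nat.eq_zero_or_pos t.length with h0 | hpos
  · have : t = [] := List.eq_nil_of_length_eq_zero h0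
    subst this
    simp [PySem.List.pyRange_one_eq_nil]
  · have haux := pv_pass_aux t hs hnr (t.length - 1) 0 (by push_cast; omega)
    rw [pvMapZ_zero] at haux
    have h0cast : ((0 : Nat) : Int) = 0 := rfl
    rw [h0cast] at haux
    rw [haux]
    apply pv_ext_getD (by simp [pvMapZ])
    intro k hk
    have hk' : k < t.length := by simpa [pvMapZ] using hk
    rw [pvMapZ_getD t _ k hk', PySem.List.getD_map_range _ _ _ _ hk']
    by_cases hd : pvDup t k
    · rw [if_pos hd]
      have : pvZ t (0 + (t.length - 1)) k := by
        refine ⟨hd, ?_⟩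
        rcases Nat.lt_or_ge k (t.length - 1) with h | h
        · left; omega
        · have hk1 : k = t.length - 1 := by omega
          rcases hd with ⟨h0, heq⟩ | ⟨h0, heq⟩
          · right
            refine ⟨by omega, ?_⟩
            have e : 0 + (t.length - 1) - 1 = k - 1 := by omega
            rw [e]; exact heq
          · omega
      rw [if_pos this]
    · rw [if_neg hd]
      have : ¬ pvZ t (0 + (t.length - 1)) k := fun h => hd h.1
      rw [if_neg this]

theorem pv_adj_two_le_count (t : List Int) (p : Nat) (hp : p + 1 < t.length)
    (heq : t.getD p 0 = t.getD (p+1) 0) : 2 ≤ t.count (t.getD p 0) := by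
  have hp' : p < t.length := by omega
  have hd2 : t.drop p = t.getD p 0 :: t.getD (p+1) 0 :: t.drop (p+2) := by
    rw [List.drop_eq_getElem_cons hp', List.drop_eq_getElem_cons hp]
    simp [List.getD, List.getElem?_eq_getElem, hp, hp']
  have hsub : (List.replicate 2 (t.getD p 0)).Sublist t := by
    have h1 : (List.replicate 2 (t.getD p 0)).Sublist (t.drop p) := by
      rw [hd2, ← heq]
      exact ((List.nil_sublist _).cons₂ _).cons₂ _
    exact h1.trans (List.drop_sublist ..)
  have := List.replicate_sublist_iff.mp hsub
  omega

theorem pvDup_iff_count (t : List Int) (hs : t.Pairwise (· ≤ ·)) (k : Nat) (hk : k < t.length) :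
    pvDup t k ↔ 1 < t.count (t.getD k 0) := by
  constructor
  · intro hd
    rcases hd with ⟨h0, heq⟩ | ⟨h1, heq⟩
    · have ek : k - 1 + 1 = k := by omega
      have := pv_adj_two_le_count t (k-1) (by omega) (by rw [ek]; exact heq)
      rw [heq] at this
      omega
    · have := pv_adj_two_le_count t k h1 heq
      omega
  · intro hcnt
    set v := t.getD k 0 with hv
    have hsplit : t.count v = (t.take k).count v + (t.drop k).count v := by
      rw [← List.count_append, List.take_append_drop]
    have hdk : t.drop k = v :: t.drop (k+1) := by
      rw [List.drop_eq_getElem_cons hk]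
      congr 1
      simp [hv, List.getD, List.getElem?_eq_getElem, hk]
    rcases Nat.eq_zero_or_pos ((t.take k).count v) with hz | hpos
    · -- a second copy is behind k
      have h2 : 0 < (t.drop (k+1)).count v := by
        rw [hdk] at hsplit
        simp [List.count_cons] at hsplit
        omega
      have hmem : v ∈ t.drop (k+1) := List.count_pos_iff.mp h2
      obtain ⟨q, hq, hqv⟩ := List.mem_iff_getElem.mp hmem
      have hlen : k + 1 + q < t.length := by
        have e := List.length_drop (l := t) (i := k+1)
        omega
      have hgq : t.getD (k+1+q) 0 = v := by
        have h := List.getElem_drop (xs := t) (i := k+1) (j := q) (h := hq)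
        rw [hqv] at h
        simp [List.getD, List.getElem?_eq_getElem, hlen]
        exact h.symm
      right
      refine ⟨by omega, ?_⟩
      have e1 : t.getD k 0 ≤ t.getD (k+1) 0 := pv_sorted_mono t hs (by omega) (by omega)
      have e2 : t.getD (k+1) 0 ≤ t.getD (k+1+q) 0 := pv_sorted_mono t hs (by omega) hlen
      rw [hgq] at e2
      omega
    · -- a copy is before k
      have hmem : v ∈ t.take k := List.count_pos_iff.mp hpos
      obtain ⟨p, hp, hpv⟩ := List.mem_iff_getElem.mp hmem
      have hpk : p < k := by
        have e := List.length_take (i := k) (l := t)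
        omega
      have hgp : t.getD p 0 = v := by
        have h := List.getElem_take (xs := t) (j := k) (i := p) (h := hp)
        rw [hpv] at h
        simp [List.getD, List.getElem?_eq_getElem, (show p < t.length by omega)]
        exact h.symm
      left
      refine ⟨by omega, ?_⟩
      have e1 : t.getD p 0 ≤ t.getD (k-1) 0 := pv_sorted_mono t hs (by omega) (by omega)
      have e2 : t.getD (k-1) 0 ≤ t.getD k 0 := pv_sorted_mono t hs (by omega) hk
      rw [hgp] at e1
      omega

theorem pvP_succ (arr : List Int) (k : Nat) (hk : k < arr.length) :
    pvP arr (k+1) = pvP arr k + arr.getD k 0 := by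
  unfold pvP
  rw [List.take_add_one, List.sum_append]
  simp [List.getElem?_eq_getElem, hk, List.getD]

theorem pv_cAux (arr : List Int) (N : Nat) (hN : N ≤ arr.length) :
    ∀ m, m ≤ N →
    (List.range m).foldl (fun cA k => cA.set (k+1) (cA.getD k 0 + arr.getD k 0))
      (List.replicate (N+1) 0)
    = (List.range (m+1)).map (fun k => pvP arr k) ++ List.replicate (N - m) 0 := by
  intro m
  induction m with
  | zero =>
    intro _
    simp [pvP, List.replicate_succ]
  | succ m ih =>
    intro hm
    rw [List.range_succ, List.foldl_append, ih (by omega)]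
    simp only [List.foldl_cons, List.foldl_nil]
    have hlenA : ((List.range (m+1)).map (fun k => pvP arr k)).length = m + 1 := by simp
    have hgetm : (((List.range (m+1)).map (fun k => pvP arr k)) ++ List.replicate (N - m) 0).getD m 0
        = pvP arr m := by
      rw [List.getD_append _ _ _ m (by simp)]
      exact PySem.List.getD_map_range _ _ _ _ (by omega)
    rw [hgetm, List.set_append, if_neg (by omega)]
    have hrep : N - m = (N - (m+1)) + 1 := by omega
    rw [hlenA, (by omega : m + 1 - (m+1) = 0), hrep, List.replicate_succ, List.set_cons_zero]
    rw [← pvP_succ arr m (by omega)]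
    simp [List.range_succ, List.map_append, List.append_assoc]

theorem pv_cArray_eq (arr : List Int) (n : Int) (h0 : 0 ≤ n) (hn : n ≤ (arr.length : Int)) :
    (PySem.List.pyRange 0 n 1).foldl
      (fun cA i => cA.set (i+1).toNat (PySem.List.pyGetD cA i 0 + PySem.List.pyGetD arr i 0))
      (List.replicate (n+1).toNat 0)
    = (List.range (n.toNat + 1)).map (fun k => pvP arr k) := by
  simp only [PySem.List.pyRange_one, List.foldl_map, Int.sub_zero]
  have e2 : (n + 1).toNat = n.toNat + 1 := by omega
  rw [e2]
  have hcongr := PySem.List.foldl_congr_mem (List.range n.toNat)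
    (fun cA (k : Nat) => cA.set ((0 + (k:Int)) + 1).toNat
      (PySem.List.pyGetD cA (0 + (k:Int)) 0 + PySem.List.pyGetD arr (0 + (k:Int)) 0))
    (fun cA (k : Nat) => cA.set (k+1) (cA.getD k 0 + arr.getD k 0))
    (List.replicate (n.toNat+1) 0)
    (by
      intro acc x _
      dsimp only
      rw [(by omega : (0 + (x:Int)) = (x:Int)),
          PySem.List.pyGetD_of_nonneg acc (0:Int) (by omega),
          PySem.List.pyGetD_of_nonneg arr (0:Int) (by omega)]
      congr 1 <;> omega)
  rw [hcongr, pv_cAux arr n.toNat (by omega) n.toNat le_rfl]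
  simp

theorem pv_pyRange_shift (a b : Int) :
    PySem.List.pyRange (a+1) (b+1) 1 = (PySem.List.pyRange a b 1).map (· + 1) := by
  rw [PySem.List.pyRange_one, PySem.List.pyRange_one, List.map_map]
  have e : (b + 1 - (a+1)).toNat = (b - a).toNat := by omega
  rw [e]
  apply List.map_congr_left
  intro k _
  simp
  omega

theorem pv_sub_eq (arr : List Int) (n : Int) (h0 : 0 ≤ n) (hn : n ≤ (arr.length : Int)) :
    (PySem.List.pyRange 1 (n+1) 1).foldl
      (fun acc i => (PySem.List.pyRange i (n+1) 1).foldl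
        (fun acc2 j => acc2 ++ [PySem.List.pyGetD ((List.range (n.toNat + 1)).map (fun k => pvP arr k)) j 0
          - PySem.List.pyGetD ((List.range (n.toNat + 1)).map (fun k => pvP arr k)) (i-1) 0]) acc)
      []
    = pvSums arr n := by
  set C := (List.range (n.toNat + 1)).map (fun k => pvP arr k) with hC
  have h1 : ∀ (acc : List Int), ∀ i ∈ PySem.List.pyRange 1 (n+1) 1,
      (PySem.List.pyRange i (n+1) 1).foldl
        (fun acc2 j => acc2 ++ [PySem.List.pyGetD C j 0 - PySem.List.pyGetD C (i-1) 0]) acc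
      = acc ++ (PySem.List.pyRange i (n+1) 1).map
          (fun j => PySem.List.pyGetD C j 0 - PySem.List.pyGetD C (i-1) 0) := by
    intro acc i _
    exact PySem.List.foldl_append_singleton_eq_map _ _ _
  rw [PySem.List.foldl_congr_mem _ _
    (fun acc i => acc ++ (PySem.List.pyRange i (n+1) 1).map
      (fun j => PySem.List.pyGetD C j 0 - PySem.List.pyGetD C (i-1) 0)) _ h1]
  rw [PySem.List.foldl_append_eq_flatMap, List.nil_append]
  have hsh : PySem.List.pyRange 1 (n+1) 1 = (PySem.List.pyRange 0 n 1).map (· + 1) := by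
    simpa using pv_pyRange_shift 0 n
  rw [hsh, List.flatMap_map]
  unfold pvSums
  rw [List.flatMap_def, List.flatMap_def]
  congr 1
  apply List.map_congr_left
  intro i hi
  obtain ⟨hi0, hin⟩ := PySem.List.mem_pyRange_one.mp hi
  rw [pv_pyRange_shift i n, List.map_map]
  apply List.map_congr_left
  intro j hj
  obtain ⟨hj0, hjn⟩ := PySem.List.mem_pyRange_one.mp hj
  simp only [Function.comp]
  rw [(by omega : i + 1 - 1 = i)]
  rw [PySem.List.pyGetD_of_nonneg C (d := 0) (by omega : (0:Int) ≤ j + 1),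
      PySem.List.pyGetD_of_nonneg C (d := 0) (by omega : (0:Int) ≤ i)]
  rw [hC, PySem.List.getD_map_range _ _ _ _ (by omega : (j+1).toNat < n.toNat + 1),
      PySem.List.getD_map_range _ _ _ _ (by omega : i.toNat < n.toNat + 1)]
  rw [(by omega : (j+1).toNat = j.toNat + 1)]

theorem pv_inner_pair (arr : List Int) (n : Int) (hn : n ≤ (arr.length : Int)) :
    ∀ (c : Nat) (a : Int), 0 ≤ a → (n - a).toNat = c → ∀ (s0 : Int) (d : PySem.Dict Int Int),
    (PySem.List.pyRange a n 1).foldl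
      (fun (p : Int × PySem.Dict Int Int) j =>
        let s := p.1 + PySem.List.pyGetD arr j 0
        (s, p.2.insert s (p.2.getD s 0 + 1)))
      (s0, d)
    = ((PySem.List.pyRange a n 1).foldl (fun s j => s + PySem.List.pyGetD arr j 0) s0,
       ((PySem.List.pyRange a n 1).map (fun j => s0 + (pvP arr (j.toNat+1) - pvP arr a.toNat))).foldl
         (fun d s => d.insert s (d.getD s 0 + 1)) d) := by
  intro c
  induction c with
  | zero =>
    intro a _ hc s0 d
    rw [PySem.List.pyRange_one_eq_nil (by omega)]
    simp
  | succ c ih =>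
    intro a ha hc s0 d
    have han : a < n := by omega
    rw [PySem.List.pyRange_one_cons han]
    simp only [List.foldl_cons, List.map_cons]
    have hga : PySem.List.pyGetD arr a 0 = pvP arr (a.toNat + 1) - pvP arr a.toNat := by
      rw [PySem.List.pyGetD_of_nonneg arr 0 ha,
          pvP_succ arr a.toNat (by omega)]
      ring
    rw [ih (a+1) (by omega) (by omega)]
    have hfun : (fun j : Int => (s0 + PySem.List.pyGetD arr a 0) + (pvP arr (j.toNat+1) - pvP arr (a+1).toNat))
        = (fun j : Int => s0 + (pvP arr (j.toNat+1) - pvP arr a.toNat)) := by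
      funext j
      rw [hga, (by omega : (a+1).toNat = a.toNat+1)]
      ring
    rw [hfun, hga]

theorem pv_dict_eq (arr : List Int) (n : Int) (hn : n ≤ (arr.length : Int)) :
    (PySem.List.pyRange 0 n 1).foldl
      (fun d i =>
        ((PySem.List.pyRange i n 1).foldl
          (fun (p : Int × PySem.Dict Int Int) j =>
            let s := p.1 + PySem.List.pyGetD arr j 0
            (s, p.2.insert s (p.2.getD s 0 + 1)))
          ((0 : Int), d)).2)
      PySem.Dict.empty
    = PySem.Dict.counter (pvSums arr n) := by
  have h1 : ∀ (d : PySem.Dict Int Int), ∀ i ∈ PySem.List.pyRange 0 n 1,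
      ((PySem.List.pyRange i n 1).foldl
        (fun (p : Int × PySem.Dict Int Int) j =>
          let s := p.1 + PySem.List.pyGetD arr j 0
          (s, p.2.insert s (p.2.getD s 0 + 1)))
        ((0 : Int), d)).2
      = ((PySem.List.pyRange i n 1).map
          (fun j => pvP arr (j.toNat+1) - pvP arr i.toNat)).foldl
          (fun d s => d.insert s (d.getD s 0 + 1)) d := by
    intro d i hi
    obtain ⟨hi0, hin⟩ := PySem.List.mem_pyRange_one.mp hi
    rw [pv_inner_pair arr n hn (n - i).toNat i hi0 rfl 0 d]
    have hfun : (fun j : Int => (0:Int) + (pvP arr (j.toNat+1) - pvP arr i.toNat))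
        = (fun j : Int => pvP arr (j.toNat+1) - pvP arr i.toNat) := by
      funext j; ring
    rw [hfun]
  rw [PySem.List.foldl_congr_mem _ _
    (fun d i => ((PySem.List.pyRange i n 1).map
      (fun j => pvP arr (j.toNat+1) - pvP arr i.toNat)).foldl
      (fun d s => d.insert s (d.getD s 0 + 1)) d) _ h1]
  rw [← PySem.Dict.foldl_insert_getD_add_one_eq_counter]
  unfold pvSums
  rw [List.foldl_flatMap]

theorem pv_alt_eq (arr : List Int) (n : Int) (hn : n ≤ (arr.length : Int)) :
    findSubarraySum_alt arr n
    = ((PySem.Set.ofList (pvSums arr n)).filter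
        (fun v => decide (((List.count v (pvSums arr n) : Int)) = 1))).sum := by
  unfold findSubarraySum_alt
  rw [pv_dict_eq arr n hn]
  show (PySem.Dict.counter (pvSums arr n)).items.foldl
    (fun acc p => if p.2 = 1 then acc + p.1 else acc) 0 = _
  rw [PySem.Dict.items_counter]
  rw [PySem.List.foldl_ite_eq_foldl_filter (fun p : Int × Int => p.2 = 1)
    (fun acc p => acc + p.1)]
  rw [List.filter_map]
  rw [PySem.List.foldl_add _ (fun p : Int × Int => p.1) 0]
  rw [List.map_map]
  rw [zero_add]
  congr 1
  · conv_rhs => rw [← List.map_id ((PySem.Set.ofList (pvSums arr n)).filter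
      (fun v => decide (((List.count v (pvSums arr n) : Int)) = 1)))]
    rfl

theorem pv_sum_map_ite (p : Int → Prop) [DecidablePred p] :
    ∀ (u : List Int), (u.map (fun v => if p v then v else 0)).sum
      = (u.filter (fun v => decide (p v))).sum := by
  intro u
  induction u with
  | nil => simp
  | cons a u ih =>
    by_cases h : p a <;> simp [h, ih]

theorem pv_sum_bridge (L : List Int) :
    (((List.range (pvSorted L).length).map
        (fun k => if pvDup (pvSorted L) k then 0 else (pvSorted L).getD k 0)).sum)
    = ((PySem.Set.ofList L).filter (fun v => decide (((List.count v L : Int)) = 1))).sum := by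
  set t := pvSorted L with ht
  have hs : t.Pairwise (· ≤ ·) := by
    simpa using PySem.List.sorted_pairwise L (fun x => x)
  have hperm : t.Perm L := PySem.List.sorted_perm L (fun x => x) false
  have h1 : ((List.range t.length).map (fun k => if pvDup t k then 0 else t.getD k 0))
      = ((List.range t.length).map (fun k => if t.count (t.getD k 0) = 1 then t.getD k 0 else 0)) := by
    apply List.map_congr_left
    intro k hk
    have hk' : k < t.length := List.mem_range.mp hk
    have hmem : t.getD k 0 ∈ t := by
      have hg : t.getD k 0 = t[k] := by simp [List.getD, List.getElem?_eq_getElem, hk']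
      rw [hg]; exact List.getElem_mem hk'
    have hcnt : 0 < t.count (t.getD k 0) := List.count_pos_iff.mpr hmem
    by_cases hd : pvDup t k
    · have := (pvDup_iff_count t hs k hk').mp hd
      rw [if_pos hd, if_neg (by omega)]
    · have hnot : ¬ (1 < t.count (t.getD k 0)) := fun h => hd ((pvDup_iff_count t hs k hk').mpr h)
      rw [if_neg hd, if_pos (by omega)]
  have hbase : (List.range t.length).map (fun k => t.getD k 0) = t := by
    apply pv_ext_getD (by simp)
    intro k hk
    have hk' : k < t.length := by simpa using hk
    rw [PySem.List.getD_map_range _ _ _ _ hk']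
  have h2 : ((List.range t.length).map (fun k => if t.count (t.getD k 0) = 1 then t.getD k 0 else 0))
      = t.map (fun v => if t.count v = 1 then v else 0) := by
    calc ((List.range t.length).map (fun k => if t.count (t.getD k 0) = 1 then t.getD k 0 else 0))
        = ((List.range t.length).map (fun k => t.getD k 0)).map
            (fun v => if t.count v = 1 then v else 0) := by rw [List.map_map]; rfl
      _ = t.map (fun v => if t.count v = 1 then v else 0) := by rw [hbase]
  rw [h1, h2, pv_sum_map_ite (fun v => t.count v = 1) t]
  have hq : (fun v : Int => decide (t.count v = 1))
      = (fun v : Int => decide (((List.count v L : Int)) = 1)) := by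
    funext v
    have := hperm.count_eq v
    rw [decide_eq_decide]
    omega
  rw [hq]
  set q := fun v : Int => decide (((List.count v L : Int)) = 1) with hqdef
  have hpermf : (t.filter q).Perm (L.filter q) := hperm.filter q
  rw [hpermf.sum_eq]
  have hfinal : (L.filter q).Perm ((PySem.Set.ofList L).filter q) := by
    rw [List.perm_iff_count]
    intro a
    by_cases hqa : q a = true
    · rw [List.count_filter hqa, List.count_filter hqa]
      have hcL : List.count a L = 1 := by
        have : ((List.count a L : Int)) = 1 := of_decide_eq_true hqa
        omega
      rw [hcL]
      have hmem : a ∈ L := List.count_pos_iff.mp (by omega)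
      exact (List.count_eq_one_of_mem (PySem.Set.nodup_ofList L)
        ((PySem.Set.mem_ofList L a).mpr hmem)).symm
    · have hz1 : List.count a (L.filter q) = 0 := by
        rw [List.count_eq_zero]
        intro hmem
        exact hqa (List.of_mem_filter hmem)
      have hz2 : List.count a ((PySem.Set.ofList L).filter q) = 0 := by
        rw [List.count_eq_zero]
        intro hmem
        exact hqa (List.of_mem_filter hmem)
      rw [hz1, hz2]
  rw [hfinal.sum_eq]

-- assembling: A's subArrSum equals pvSums (both empty when n < 0)
theorem pv_subArr_eq (arr : List Int) (n : Int) (hn : n ≤ (arr.length : Int)) :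
    pvSubArr arr n = pvSums arr n := by
  rcases lt_or_ge n 0 with hneg | h0
  · unfold pvSubArr pvSums
    rw [PySem.List.pyRange_one_eq_nil (by omega : n + 1 ≤ 1),
        PySem.List.pyRange_one_eq_nil (by omega : n ≤ 0)]
    rfl
  · unfold pvSubArr
    rw [show pvCArray arr n = (List.range (n.toNat + 1)).map (fun k => pvP arr k) from
      pv_cArray_eq arr n h0 hn]
    exact pv_sub_eq arr n h0 hn

-- ===== VERDICT (by name: the statement is the Claim_ definition above) =====
theorem findSubarraySum_spec : Claim_equal_findSubarraySum := by
  intro arr n _ hpre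
  obtain ⟨hn, hnr⟩ := hpre
  unfold Spec_findSubarraySum
  have ht : pvT arr n = pvSorted (pvSums arr n) := by
    unfold pvT pvSorted
    rw [pv_subArr_eq arr n hn]
  have hs : (pvT arr n).Pairwise (· ≤ ·) := by
    unfold pvT
    simpa using PySem.List.sorted_pairwise (pvSubArr arr n) (fun x => x)
  have hnr' : ¬ pvRaises (pvT arr n) := by rw [ht]; exact hnr
  have ht2 : pvT2 arr n = (List.range (pvT arr n).length).map
      (fun k => if pvDup (pvT arr n) k then 0 else (pvT arr n).getD k 0) := by
    unfold pvT2
    exact pv_pass_eq (pvT arr n) hs hnr'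
  unfold findSubarraySum
  rw [PySem.List.foldl_pyRange_zero_pyGetD' (pvT2 arr n) 0 (fun acc v => acc + v) 0]
  rw [← List.sum_eq_foldl, ht2, ht]
  rw [pv_sum_bridge (pvSums arr n)]
  exact (pv_alt_eq arr n hn).symm

@[simp]
theorem findSubarraySum_raises : Claim_raises_findSubarraySum := by
  unfold Claim_raises_findSubarraySum
  refine ⟨?_, by decide⟩
  intro arr n _ hr hp
  exact hp.2 hr.2
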